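-- pv_equiv track=rewrite | github.com/paiml/depyler | examples/hard_pattern_recognition.py | find_common_difference
-- ===== SOURCE A (Python) =====
-- def find_common_difference(arr: list[int]) -> int:
--     """Find common difference of arithmetic sequence (0 if not arithmetic)."""
--     if len(arr) < 2:
--         return 0
--     diff: int = arr[1] - arr[0]
--     i: int = 2
--     while i < len(arr):
--         if arr[i] - arr[i - 1] != diff:
--             return 0
--         i = i + 1
--     return diff
-- ===== SOURCE B (Python) =====
-- def find_common_difference(arr: list[int]) -> int:
--     """Find common difference of arithmetic sequence (0 if not arithmetic)."""
--     if len(arr) < 2: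
--         return 0
--     d = arr[1] - arr[0]
--     if arr == [arr[0] + i * d for i in range(len(arr))]:
--         return d
--     return 0
-- ===== Notes on version B (the rewrite author's own statement) =====
-- stated objective: alternative
-- what changed: Instead of comparing consecutive differences, B guesses d from the first two elements, rebuilds the candidate arithmetic sequence (first element plus i times d) as a closed-form comprehension, and returns d iff the whole list equals that reconstruction.
import Mathlib
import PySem

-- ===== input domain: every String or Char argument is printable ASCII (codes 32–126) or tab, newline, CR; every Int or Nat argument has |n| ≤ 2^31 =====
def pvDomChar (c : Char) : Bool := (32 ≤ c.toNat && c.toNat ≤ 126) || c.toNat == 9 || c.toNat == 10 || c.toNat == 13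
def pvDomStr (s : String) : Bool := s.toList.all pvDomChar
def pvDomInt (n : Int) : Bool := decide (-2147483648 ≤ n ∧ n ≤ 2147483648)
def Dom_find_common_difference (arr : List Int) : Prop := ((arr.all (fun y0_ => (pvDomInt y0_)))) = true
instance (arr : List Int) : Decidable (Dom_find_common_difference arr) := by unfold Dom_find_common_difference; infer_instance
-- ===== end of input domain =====

-- B replaces A's scan of consecutive differences by reconstructing the candidate sequence arr[0]+i*d (d guessed from the first two elements) and testing whole-list equality; same return value everywhere.
-- ===== PORT A =====
-- the while loop over i (comparing arr[i] with arr[i-1]) as structural recursion over the suffix, carrying prev = arr[i-1]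
def goA (diff : Int) (prev : Int) : List Int → Int
  | [] => diff
  | x :: xs => if x - prev ≠ diff then 0 else goA diff x xs

def find_common_difference (arr : List Int) : Int :=
  match arr with
  | a :: b :: rest => goA (b - a) b rest
  | _ => 0

-- ===== PORT B =====
-- the comprehension [arr[0] + i*d for i in range(len(arr))] ported via pyRange; arr[0]/arr[1] guarded by the len check
def find_common_difference_alt (arr : List Int) : Int :=
  if arr.length < 2 then 0
  else
    let d := PySem.List.pyGetD arr 1 0 - PySem.List.pyGetD arr 0 0
    if arr = (PySem.List.pyRange 0 (arr.length : Int) 1).map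
        (fun i => PySem.List.pyGetD arr 0 0 + i * d)
    then d else 0

-- ===== PRECONDITION & SPEC =====
def Spec_find_common_difference (arr : List Int) (out : Int) : Prop := out = find_common_difference_alt arr
instance (arr : List Int) (out : Int) : Decidable (Spec_find_common_difference arr out) := by unfold Spec_find_common_difference; infer_instance

-- ===== CLAIM (what is proved, stated in full; the proofs are below) =====
def Claim_equal_find_common_difference : Prop := ∀ (arr : List Int), Dom_find_common_difference arr → Spec_find_common_difference arr (find_common_difference arr)

-- ===== LEMMAS AND PROOFS =====

-- A's suffix loop returns d exactly when the suffix is the affine continuation of prev by d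
lemma goA_eq_affine (d : Int) (rest : List Int) (prev : Int) :
    goA d prev rest =
      if rest = (List.range rest.length).map (fun i : Nat => prev + ((i : Int) + 1) * d) then d else 0 := by
  induction rest generalizing prev with
  | nil => simp [goA]
  | cons x xs ih =>
    rw [goA]
    by_cases h : x - prev = d
    · have hx : x = prev + d := by omega
      simp only [h, ne_eq, not_true_eq_false, if_false, ih x]
      have hiff : (xs = (List.range xs.length).map (fun i : Nat => x + ((i : Int) + 1) * d))
          ↔ (x :: xs = (List.range (x :: xs).length).map (fun i : Nat => prev + ((i : Int) + 1) * d)) := by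
        rw [List.length_cons, List.range_succ_eq_map, List.map_cons, List.map_map,
          List.cons_eq_cons]
        constructor
        · intro htl
          refine ⟨by simp [hx], ?_⟩
          conv_lhs => rw [htl]
          exact List.map_congr_left (fun i _ => by
            simp only [Function.comp_apply]; push_cast; rw [hx]; ring)
        · rintro ⟨-, htl⟩
          conv_lhs => rw [htl]
          exact List.map_congr_left (fun i _ => by
            simp only [Function.comp_apply]; push_cast; rw [hx]; ring)
      exact if_congr hiff rfl rfl
    · simp only [h, ne_eq, not_false_eq_true, if_true]
      rw [if_neg]
      intro hc
      rw [List.length_cons, List.range_succ_eq_map, List.map_cons] at hc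
      have h1 := (List.cons_eq_cons.1 hc).1
      simp only [Nat.cast_zero, zero_add, one_mul] at h1
      omega

-- ===== VERDICT (by name: the statement is the Claim_ definition above) =====
theorem find_common_difference_spec : Claim_equal_find_common_difference := by
  intro arr _
  unfold Spec_find_common_difference find_common_difference find_common_difference_alt
  match arr with
  | [] => rfl
  | [a] => rfl
  | a :: b :: rest =>
    simp only
    rw [goA_eq_affine]
    have h0 : PySem.List.pyGetD (a :: b :: rest) 0 0 = a := by
      simp [PySem.List.pyGetD_ofNat']
    have h1 : PySem.List.pyGetD (a :: b :: rest) 1 0 = b := by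
      simp [PySem.List.pyGetD_ofNat']
    conv_rhs => rw [if_neg (show ¬ (a :: b :: rest).length < 2 by simp), h1, h0]
    have hr : PySem.List.pyRange 0 (((a :: b :: rest).length : Nat) : Int) 1
        = (List.range (a :: b :: rest).length).map (fun k : Nat => (k : Int)) := by
      rw [PySem.List.pyRange_one]
      simp only [Int.sub_zero, Int.toNat_natCast, zero_add]
    rw [hr, List.map_map]
    have hcond : (rest = (List.range rest.length).map (fun i : Nat => b + ((i : Int) + 1) * (b - a)))
        ↔ ((a :: b :: rest) = (List.range (a :: b :: rest).length).map
            ((fun i => a + i * (b - a)) ∘ (fun k : Nat => (k : Int)))) := by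
      simp only [List.length_cons, List.range_succ_eq_map, List.map_cons, List.map_map,
        List.cons_eq_cons, Function.comp_apply, Nat.cast_zero, zero_mul, add_zero,
        Nat.cast_succ, true_and]
      constructor
      · intro h
        refine ⟨by push_cast; ring, ?_⟩
        conv_lhs => rw [h]
        exact List.map_congr_left (fun i _ => by
          simp only [Function.comp_apply]; push_cast; ring)
      · rintro ⟨-, htl⟩
        conv_lhs => rw [htl]
        exact List.map_congr_left (fun i _ => by
          simp only [Function.comp_apply]; push_cast; ring)
    exact if_congr hcond rfl rfl
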